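-- pv_equiv track=rewrite | github.com/mulosbron/EthNodeMap | local/api.py | os_match
-- ===== SOURCE A (Python) =====
-- def os_match(osFilterValue, markerOS):
--     match osFilterValue:
--         case 'linux':
--             return 'linux' in markerOS
--         case 'windows':
--             return 'windows' in markerOS
--         case 'macos':
--             return 'macos' in markerOS
--         case 'android':
--             return 'android' in markerOS
--         case 'freebsd':
--             return 'freebsd' in markerOS
--         case 'darwin':
--             return 'darwin' in markerOS
--         case 'other oss':
--             return all(
--                 keyword not in markerOS for keyword in ['linux', 'windows', 'macos', 'android', 'freebsd', 'darwin'])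
--         case _:
--             return False
-- ===== SOURCE B (Python) =====
-- KEYWORDS = ['linux', 'windows', 'macos', 'android', 'freebsd', 'darwin']
--
-- def os_match(osFilterValue, markerOS):
--     # Analyse the marker first: which OS keywords does it mention?
--     detected = [k for k in KEYWORDS if k in markerOS]
--     if osFilterValue == 'other oss':
--         return not detected
--     return osFilterValue in detected
-- ===== Notes on version B (the rewrite author's own statement) =====
-- stated objective: alternative
-- what changed: Inverted the computation: instead of dispatching on the filter value and then running one hard-coded substring test per branch, B first scans markerOS once to build the list of OS keywords it contains, then answers every query by membership in (or emptiness of) that detected list.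
import Mathlib
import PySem

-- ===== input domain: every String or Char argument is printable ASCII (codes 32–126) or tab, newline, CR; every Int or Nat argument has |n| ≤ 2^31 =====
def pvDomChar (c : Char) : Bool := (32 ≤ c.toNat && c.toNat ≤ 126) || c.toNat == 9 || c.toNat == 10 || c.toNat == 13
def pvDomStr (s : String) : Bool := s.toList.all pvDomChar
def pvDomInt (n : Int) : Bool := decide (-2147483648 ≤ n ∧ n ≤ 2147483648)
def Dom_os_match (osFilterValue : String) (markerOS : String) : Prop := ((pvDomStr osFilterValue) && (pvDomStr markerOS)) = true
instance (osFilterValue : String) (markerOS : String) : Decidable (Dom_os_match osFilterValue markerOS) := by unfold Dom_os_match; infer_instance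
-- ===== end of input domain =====

-- B inverts the computation: it first builds the list of OS keywords detected in markerOS,
-- then answers by membership/emptiness of that list (objective: alternative, same cost).
-- ===== PORT A =====
def os_match (osFilterValue : String) (markerOS : String) : Bool :=
  if osFilterValue = "linux" then PySem.Str.isIn "linux" markerOS
  else if osFilterValue = "windows" then PySem.Str.isIn "windows" markerOS
  else if osFilterValue = "macos" then PySem.Str.isIn "macos" markerOS
  else if osFilterValue = "android" then PySem.Str.isIn "android" markerOS
  else if osFilterValue = "freebsd" then PySem.Str.isIn "freebsd" markerOS
  else if osFilterValue = "darwin" then PySem.Str.isIn "darwin" markerOS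
  else if osFilterValue = "other oss" then
    (["linux", "windows", "macos", "android", "freebsd", "darwin"]).all
      (fun keyword => !PySem.Str.isIn keyword markerOS)
  else false

-- ===== PORT B =====
def pvKeywords : List String := ["linux", "windows", "macos", "android", "freebsd", "darwin"]

def os_match_alt (osFilterValue : String) (markerOS : String) : Bool :=
  let detected := pvKeywords.filter (fun k => PySem.Str.isIn k markerOS)
  if osFilterValue = "other oss" then detected.isEmpty
  else decide (osFilterValue ∈ detected)

-- ===== PRECONDITION & SPEC =====
def Spec_os_match (osFilterValue : String) (markerOS : String) (out : Bool) : Prop := out = os_match_alt osFilterValue markerOS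
instance (osFilterValue : String) (markerOS : String) (out : Bool) : Decidable (Spec_os_match osFilterValue markerOS out) := by unfold Spec_os_match; infer_instance

-- ===== CLAIM (what is proved, stated in full; the proofs are below) =====
def Claim_equal_os_match : Prop := ∀ (osFilterValue : String) (markerOS : String), Dom_os_match osFilterValue markerOS → Spec_os_match osFilterValue markerOS (os_match osFilterValue markerOS)

-- ===== LEMMAS AND PROOFS =====
theorem pvFilterIsEmptyEqAll {α : Type} (p : α → Bool) (l : List α) :
    (l.filter p).isEmpty = l.all (fun a => !p a) := by
  induction l with
  | nil => rfl
  | cons a t ih => cases h : p a <;> simp [List.filter_cons, h, ih]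


-- ===== VERDICT (by name: the statement is the Claim_ definition above) =====
theorem os_match_spec : Claim_equal_os_match := by
  intro f m _
  unfold Spec_os_match os_match os_match_alt
  split_ifs with h1 h2 h3 h4 h5 h6 h7 h8 <;>
    first
      | (rw [pvFilterIsEmptyEqAll]; rfl)
      | simp_all [List.mem_filter, pvKeywords]
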